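-- pv_equiv track=rewrite | github.com/Jasmineame/Practice | code/scripts/metrics.py | segments_from_labels
-- ===== SOURCE A (Python) =====
-- from typing import List, Tuple
--
-- def segments_from_labels(labels: List[int]) -> List[Tuple[int, int]]:
--     """
--     Convert label sequence into contiguous segments.
--     Returns half-open intervals [start, end).
--     """
--     segments = []
--     start = 0
--     for i in range(1, len(labels)):
--         if labels[i] != labels[i - 1]:
--             segments.append((start, i))
--             start = i
--     segments.append((start, len(labels)))
--     return segments
-- ===== SOURCE B (Python) =====
-- from typing import List, Tuple
--
-- def segments_from_labels(labels: List[int]) -> List[Tuple[int, int]]: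
--     """
--     Convert label sequence into contiguous segments.
--     Returns half-open intervals [start, end).
--     """
--     n = len(labels)
--     segments = []
--     start = 0
--     while True:
--         # scan the run beginning at start, comparing against its first element
--         end = start + 1
--         while end < n and labels[end] == labels[start]:
--             end += 1
--         if end >= n:
--             segments.append((start, n))
--             return segments
--         segments.append((start, end))
--         start = end
-- ===== Notes on version B (the rewrite author's own statement) =====
-- stated objective: alternative
-- what changed: Replaces A's single pass over adjacent index pairs with a running segment start by run-peeling: an outer loop per run whose inner scan compares each element against the run's first element, emitting one segment per run (and recursing on the remaining suffix in the port).
import Mathlib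
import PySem

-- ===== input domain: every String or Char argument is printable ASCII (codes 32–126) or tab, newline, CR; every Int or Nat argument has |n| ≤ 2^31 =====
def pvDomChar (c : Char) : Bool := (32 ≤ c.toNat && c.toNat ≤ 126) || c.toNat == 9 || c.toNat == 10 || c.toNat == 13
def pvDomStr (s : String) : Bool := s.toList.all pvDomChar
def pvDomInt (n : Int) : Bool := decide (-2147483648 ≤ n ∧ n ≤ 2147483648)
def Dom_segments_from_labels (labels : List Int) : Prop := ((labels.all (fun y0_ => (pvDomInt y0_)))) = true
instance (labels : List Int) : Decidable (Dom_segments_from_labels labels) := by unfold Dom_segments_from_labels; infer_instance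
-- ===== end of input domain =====

-- B replaces A's index loop over change points (with a running start) by a
-- run-peeling recursion: measure the leading run of equal labels, emit one
-- segment, recurse on the remaining suffix; objective: alternative, same cost.

-- ===== PORT A =====
-- running accumulator: state = (segments so far, start); indices i of range(1, len)
-- are always in range, so pyGetD's default 0 is never consulted (exact).
def segments_from_labels (labels : List Int) : List (Int × Int) :=
  let st := (PySem.List.pyRange 1 (labels.length : Int) 1).foldl
    (fun (st : List (Int × Int) × Int) i =>
      if PySem.List.pyGetD labels i 0 ≠ PySem.List.pyGetD labels (i - 1) 0 then
        (st.1 ++ [(st.2, i)], i)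
      else st) ([], 0)
  st.1 ++ [(st.2, (labels.length : Int))]

-- ===== PORT B =====
-- inner scan 'end = start+1; while end < n and labels[end] == labels[start]: end += 1':
-- run_length rest = end - start, transcribed as structural recursion over the suffix
-- beginning at start (comparing each element to the suffix's first element)
def runLenAux (v : Int) : List Int → Nat
  | [] => 0
  | y :: t => if y = v then 1 + runLenAux v t else 0

def run_length : List Int → Nat
  | [] => 0
  | x :: t => 1 + runLenAux x t

-- the outer while loop, as tail recursion on the suffix beginning at start:
-- scan the leading run, emit one segment, continue after it ('end' is start + run_length)
def segRec (start : Int) (rest : List Int) : List (Int × Int) :=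
  -- 'end >= n' is rest.length ≤ run_length rest; Python's 'end' is written inline
  if h : rest.length ≤ run_length rest then [(start, start + (rest.length : Int))]
  else (start, start + (run_length rest : Int)) ::
    segRec (start + (run_length rest : Int)) (rest.drop (run_length rest))
termination_by rest.length
decreasing_by
  simp only [List.length_drop]
  cases rest with
  | nil => simp at h
  | cons x t => simp only [run_length] at *; omega

def segments_from_labels_alt (labels : List Int) : List (Int × Int) :=
  segRec 0 labels

-- ===== PRECONDITION & SPEC =====
def Spec_segments_from_labels (labels : List Int) (out : List (Int × Int)) : Prop := out = segments_from_labels_alt labels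
instance (labels : List Int) (out : List (Int × Int)) : Decidable (Spec_segments_from_labels labels out) := by unfold Spec_segments_from_labels; infer_instance

-- ===== CLAIM (what is proved, stated in full; the proofs are below) =====
def Claim_equal_segments_from_labels : Prop := ∀ (labels : List Int), Dom_segments_from_labels labels → Spec_segments_from_labels labels (segments_from_labels labels)

-- ===== LEMMAS AND PROOFS =====

-- the change-point list of A's loop predicate (proof-only helper)
def pvChg (labels : List Int) : List Int :=
  (PySem.List.pyRange 1 (labels.length : Int) 1).filter
    (fun i => PySem.List.pyGetD labels i 0 ≠ PySem.List.pyGetD labels (i - 1) 0)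

-- the bounds/zip characterisation both ports are reduced to (proof-only helper)
def pvBsegs (labels : List Int) : List (Int × Int) :=
  let bounds : List Int := 0 :: pvChg labels ++ [(labels.length : Int)]
  List.zip bounds bounds.tail

-- the default of getLastD is irrelevant on a nonempty list
theorem getLastD_cons_cons (a b d : Int) (t : List Int) :
    (a :: b :: t).getLastD d = (b :: t).getLastD d := by
  simp [List.getLastD_eq_getLast?]

-- appending one more boundary m extends the adjacent-pair list by (last, m)
theorem zip_tail_concat (bs : List Int) (h : bs ≠ []) (m : Int) :
    List.zip (bs ++ [m]) (bs ++ [m]).tail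
      = List.zip bs bs.tail ++ [(bs.getLastD 0, m)] := by
  induction bs with
  | nil => exact absurd rfl h
  | cons a t ih =>
    cases t with
    | nil => simp
    | cons b t' =>
      have ih' := ih (by simp)
      simp only [List.cons_append, List.tail_cons, List.zip_cons_cons] at ih' ⊢
      rw [ih', getLastD_cons_cons]

-- loop invariant: A's fold over any index list, started from the paired form of a
-- nonempty boundary list bs, yields the paired form of bs ++ (accepted indices)
theorem fold_inv (labels : List Int) (l : List Int) :
    ∀ (bs : List Int), bs ≠ [] →
    l.foldl (fun (st : List (Int × Int) × Int) i =>
        if PySem.List.pyGetD labels i 0 ≠ PySem.List.pyGetD labels (i - 1) 0 then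
          (st.1 ++ [(st.2, i)], i)
        else st)
      (List.zip bs bs.tail, bs.getLastD 0)
    = (List.zip
        (bs ++ l.filter (fun i => PySem.List.pyGetD labels i 0 ≠ PySem.List.pyGetD labels (i - 1) 0))
        (bs ++ l.filter (fun i => PySem.List.pyGetD labels i 0 ≠ PySem.List.pyGetD labels (i - 1) 0)).tail,
       (bs ++ l.filter (fun i => PySem.List.pyGetD labels i 0 ≠ PySem.List.pyGetD labels (i - 1) 0)).getLastD 0) := by
  induction l with
  | nil => intro bs h; simp
  | cons i l ih =>
    intro bs h
    by_cases hp : PySem.List.pyGetD labels i 0 ≠ PySem.List.pyGetD labels (i - 1) 0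
    · have hfc : List.filter
          (fun i => PySem.List.pyGetD labels i 0 ≠ PySem.List.pyGetD labels (i - 1) 0) (i :: l)
          = i :: List.filter
              (fun i => PySem.List.pyGetD labels i 0 ≠ PySem.List.pyGetD labels (i - 1) 0) l := by
        rw [List.filter_cons, if_pos]; exact decide_eq_true hp
      have hlast : (bs ++ [i]).getLastD 0 = i := by simp
      have hstep := ih (bs ++ [i]) (by simp)
      rw [zip_tail_concat bs h i, hlast] at hstep
      simp only [List.foldl_cons, if_pos hp, hfc]
      rw [List.append_cons bs i]
      exact hstep
    · have hfc : List.filter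
          (fun i => PySem.List.pyGetD labels i 0 ≠ PySem.List.pyGetD labels (i - 1) 0) (i :: l)
          = List.filter
              (fun i => PySem.List.pyGetD labels i 0 ≠ PySem.List.pyGetD labels (i - 1) 0) l := by
        rw [List.filter_cons, if_neg]; simpa using hp
      simp only [List.foldl_cons, if_neg hp, hfc]
      exact ih bs h

-- A equals the bounds/zip characterisation
theorem A_eq_bsegs (labels : List Int) :
    segments_from_labels labels = pvBsegs labels := by
  unfold segments_from_labels pvBsegs pvChg
  have hfold := fold_inv labels (PySem.List.pyRange 1 (labels.length : Int) 1) [0] (by simp)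
  have hinit : (List.zip [(0 : Int)] ([(0 : Int)]).tail, ([(0 : Int)]).getLastD 0)
      = (([] : List (Int × Int)), (0 : Int)) := rfl
  rw [hinit] at hfold
  simp only [List.singleton_append] at hfold
  simp only [hfold]
  have hcne : ((0 : Int) :: (PySem.List.pyRange 1 (labels.length : Int) 1).filter
      (fun i => PySem.List.pyGetD labels i 0 ≠ PySem.List.pyGetD labels (i - 1) 0)) ≠ [] := by
    simp
  rw [zip_tail_concat _ hcne (labels.length : Int)]

-- elements inside the leading run all equal the value compared against
theorem runLenAux_getD (v : Int) (t : List Int) :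
    ∀ j : Nat, j < runLenAux v t → t.getD j 0 = v := by
  induction t with
  | nil => intro j h; simp [runLenAux] at h
  | cons y t ih =>
    intro j h
    simp only [runLenAux] at h
    by_cases hy : y = v
    · rw [if_pos hy] at h
      cases j with
      | zero => simpa using hy
      | succ j' => simpa using ih j' (by omega)
    · rw [if_neg hy] at h; omega

theorem run_getD (x : Int) (t : List Int) :
    ∀ j : Nat, j < run_length (x :: t) → (x :: t).getD j 0 = x := by
  intro j h
  simp only [run_length] at h
  cases j with
  | zero => rfl
  | succ j' => simpa using runLenAux_getD x t j' (by omega)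

-- the element just past the leading run differs from the run's value
theorem runLenAux_boundary (v : Int) (t : List Int) :
    runLenAux v t < t.length → t.getD (runLenAux v t) 0 ≠ v := by
  induction t with
  | nil => intro h; simp [runLenAux] at h
  | cons y t ih =>
    intro h
    simp only [runLenAux, List.length_cons] at h ⊢
    by_cases hy : y = v
    · rw [if_pos hy] at h ⊢
      rw [Nat.add_comm 1 (runLenAux v t)]
      simpa using ih (by omega)
    · rw [if_neg hy] at h ⊢
      simpa using hy

theorem run_boundary (x : Int) (t : List Int) :
    run_length (x :: t) < (x :: t).length →
    (x :: t).getD (run_length (x :: t)) 0 ≠ (x :: t).getD (run_length (x :: t) - 1) 0 := by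
  intro h
  have hk : run_length (x :: t) = 1 + runLenAux x t := rfl
  have h1 : (x :: t).getD (run_length (x :: t)) 0 = t.getD (runLenAux x t) 0 := by
    rw [hk]; simp [Nat.add_comm]
  have h2 : (x :: t).getD (run_length (x :: t) - 1) 0 = x := by
    apply run_getD; omega
  rw [h1, h2]
  apply runLenAux_boundary
  simp only [List.length_cons] at h; omega

-- getD of a dropped suffix
theorem getD_drop (xs : List Int) (k j : Nat) :
    (xs.drop k).getD j 0 = xs.getD (k + j) 0 := by
  simp [List.getD_eq_getElem?_getD, List.getElem?_drop]

-- pyGetD at a nonnegative Int index is getD at its toNat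
theorem pyGetD_toNat (xs : List Int) (i : Int) (h : 0 ≤ i) :
    PySem.List.pyGetD xs i 0 = xs.getD i.toNat 0 := by
  have hcast := PySem.List.pyGetD_natCast xs i.toNat (0 : Int)
  rw [Int.toNat_of_nonneg h] at hcast
  exact hcast

-- change-point decomposition: no change inside the run, a change at its end,
-- and the remaining change points are those of the dropped suffix, shifted by k
theorem chg_decomp (labels : List Int) (hk : run_length labels < labels.length) :
    pvChg labels = (run_length labels : Int) ::
      (pvChg (labels.drop (run_length labels))).map (· + (run_length labels : Int)) := by
  set k := run_length labels with hkdef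
  have hk1 : 1 ≤ k := by
    cases labels with
    | nil => simp at hk
    | cons x t => simp [hkdef, run_length]
  have hkn : (k : Int) < (labels.length : Int) := by exact_mod_cast hk
  have hsplit : PySem.List.pyRange 1 (labels.length : Int) 1
      = PySem.List.pyRange 1 (k : Int) 1 ++ PySem.List.pyRange (k : Int) (labels.length : Int) 1 := by
    exact PySem.List.pyRange_one_append 1 (k : Int) (labels.length : Int) (by exact_mod_cast hk1) (le_of_lt hkn)
  have hcons : PySem.List.pyRange (k : Int) (labels.length : Int) 1
      = (k : Int) :: PySem.List.pyRange ((k : Int) + 1) (labels.length : Int) 1 :=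
    PySem.List.pyRange_one_cons hkn
  unfold pvChg
  rw [hsplit, List.filter_append, hcons, List.filter_cons]
  -- the predicate, abbreviated
  have hhead : ∀ i : Int, 1 ≤ i → i < (k : Int) →
      PySem.List.pyGetD labels i 0 = PySem.List.pyGetD labels (i - 1) 0 := by
    intro i h1 h2
    cases labels with
    | nil => simp [hkdef, run_length] at hk
    | cons x t =>
      rw [pyGetD_toNat _ i (by omega), pyGetD_toNat _ (i - 1) (by omega)]
      rw [run_getD x t i.toNat (by omega), run_getD x t (i - 1).toNat (by omega)]
  have hfilter1 : (PySem.List.pyRange 1 (k : Int) 1).filter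
      (fun i => PySem.List.pyGetD labels i 0 ≠ PySem.List.pyGetD labels (i - 1) 0) = [] := by
    rw [List.filter_eq_nil_iff]
    intro i hi
    rw [PySem.List.mem_pyRange_one] at hi
    simpa using hhead i hi.1 hi.2
  have hpk : PySem.List.pyGetD labels (k : Int) 0 ≠ PySem.List.pyGetD labels ((k : Int) - 1) 0 := by
    cases labels with
    | nil => simp at hk
    | cons x t =>
      rw [pyGetD_toNat _ (k : Int) (by omega), pyGetD_toNat _ ((k : Int) - 1) (by omega)]
      have h2 : ((k : Int) - 1).toNat = k - 1 := by omega
      simp only [Int.toNat_natCast, h2]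
      exact run_boundary x t hk
  rw [if_pos (by simpa using hpk), hfilter1, List.nil_append]
  -- tail part: shift the suffix's range
  congr 1
  have hlen : ((labels.drop k).length : Int) = (labels.length : Int) - (k : Int) := by
    simp [List.length_drop]; omega
  have hrange : PySem.List.pyRange ((k : Int) + 1) (labels.length : Int) 1
      = (PySem.List.pyRange 1 ((labels.drop k).length : Int) 1).map (· + (k : Int)) := by
    rw [hlen, PySem.List.pyRange_one, PySem.List.pyRange_one]
    have : ((labels.length : Int) - (k : Int) - 1).toNat
        = ((labels.length : Int) - ((k : Int) + 1)).toNat := by omega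
    rw [List.map_map, this]
    apply List.map_congr_left
    intro a _; simp; ring
  rw [hrange, List.filter_map]
  congr 1
  apply List.filter_congr
  intro j hj
  rw [PySem.List.mem_pyRange_one] at hj
  have e1 : PySem.List.pyGetD labels (j + (k : Int)) 0 = PySem.List.pyGetD (labels.drop k) j 0 := by
    rw [pyGetD_toNat _ (j + (k : Int)) (by omega), pyGetD_toNat _ j (by omega), getD_drop]
    congr 1; omega
  have e2 : PySem.List.pyGetD labels (j + (k : Int) - 1) 0 = PySem.List.pyGetD (labels.drop k) (j - 1) 0 := by
    rw [pyGetD_toNat _ (j + (k : Int) - 1) (by omega), pyGetD_toNat _ (j - 1) (by omega), getD_drop]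
    congr 1; omega
  simp only [Function.comp_apply, decide_eq_decide]
  rw [e1, e2]

-- adjacent-pair list, structurally (equals List.zip l l.tail)
def pairAdj : List Int → List (Int × Int)
  | a :: b :: t => (a, b) :: pairAdj (b :: t)
  | _ => []

theorem zip_tail_eq_pairAdj (l : List Int) : List.zip l l.tail = pairAdj l := by
  induction l with
  | nil => rfl
  | cons a t ih =>
    cases t with
    | nil => rfl
    | cons b t' =>
      simp only [List.tail_cons] at ih
      simp [pairAdj, List.zip_cons_cons, ih]

theorem pairAdj_map_shift (f : Int → Int) (l : List Int) :
    pairAdj (l.map f) = (pairAdj l).map (fun p => (f p.1, f p.2)) := by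
  induction l with
  | nil => rfl
  | cons a t ih =>
    cases t with
    | nil => rfl
    | cons b t' =>
      simp only [List.map_cons, pairAdj]
      have ih' : pairAdj (f b :: t'.map f) = (pairAdj (b :: t')).map (fun p => (f p.1, f p.2)) := ih
      rw [ih']

-- shifting the start argument shifts every emitted pair
theorem segRec_shift (rest : List Int) (s : Int) :
    segRec s rest = (segRec 0 rest).map (fun p => (p.1 + s, p.2 + s)) := by
  induction hn : rest.length using Nat.strong_induction_on generalizing rest s with
  | _ n ih =>
    conv_lhs => rw [segRec]
    conv_rhs => rw [segRec]
    by_cases h : rest.length ≤ run_length rest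
    · rw [dif_pos h, dif_pos h]
      simp [Int.add_comm]
    · rw [dif_neg h, dif_neg h]
      have hk1 : 1 ≤ run_length rest := by
        cases rest with
        | nil => simp at h
        | cons x t => simp [run_length]
      have hlt : (rest.drop (run_length rest)).length < n := by
        simp only [List.length_drop]; omega
      rw [ih _ hlt _ (s + (run_length rest : Int)) rfl,
          ih _ hlt _ ((0 : Int) + (run_length rest : Int)) rfl]
      simp only [List.map_cons, List.map_map]
      congr 1
      · simp [Int.add_comm]
      · congr 1
        funext p
        simp only [Function.comp_apply, Prod.mk.injEq]
        refine ⟨by ring, by ring⟩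

-- the bounds/zip characterisation satisfies segRec's recursion
theorem bsegs_eq_segRec (labels : List Int) :
    pvBsegs labels = segRec 0 labels := by
  induction hn : labels.length using Nat.strong_induction_on generalizing labels with
  | _ n ih =>
    conv_rhs => rw [segRec]
    by_cases h : labels.length ≤ run_length labels
    · rw [dif_pos h]
      -- no change point: every index 1 ≤ i < length lies inside the run
      have hchg : pvChg labels = [] := by
        unfold pvChg
        rw [List.filter_eq_nil_iff]
        intro i hi
        rw [PySem.List.mem_pyRange_one] at hi
        cases labels with
        | nil => simp at hi; omega
        | cons x t =>
          have h1 : PySem.List.pyGetD (x :: t) i 0 = x := by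
            rw [pyGetD_toNat _ i (by omega)]
            apply run_getD
            have : i < ((x :: t).length : Int) := hi.2
            omega
          have h2 : PySem.List.pyGetD (x :: t) (i - 1) 0 = x := by
            rw [pyGetD_toNat _ (i - 1) (by omega)]
            apply run_getD
            have : i < ((x :: t).length : Int) := hi.2
            omega
          simp [h1, h2]
      unfold pvBsegs
      rw [hchg]
      simp
    · rw [dif_neg h]
      set k := run_length labels with hkdef
      have hk1 : 1 ≤ k := by
        cases labels with
        | nil => simp at h
        | cons x t => simp [hkdef, run_length]
      have hlt : (labels.drop k).length < n := by
        simp only [List.length_drop]; omega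
      have hIH := ih _ hlt (labels.drop k) rfl
      have hdec := chg_decomp labels (by omega)
      rw [← hkdef] at hdec
      rw [segRec_shift (labels.drop k) ((0 : Int) + (k : Int)), ← hIH]
      unfold pvBsegs
      rw [hdec, zip_tail_eq_pairAdj, zip_tail_eq_pairAdj]
      have hlen : ((labels.drop k).length : Int) = (labels.length : Int) - (k : Int) := by
        simp only [List.length_drop]; omega
      have hbounds : (k : Int) :: ((pvChg (labels.drop k)).map (· + (k : Int)) ++ [(labels.length : Int)])
          = ((0 : Int) :: (pvChg (labels.drop k) ++ [((labels.drop k).length : Int)])).map (· + (k : Int)) := by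
        simp only [List.map_cons, List.map_append]
        have h1 : (0 : Int) + (k : Int) = (k : Int) := by ring
        have h2 : (((labels.drop k).length : Int)) + (k : Int) = (labels.length : Int) := by
          rw [hlen]; ring
        rw [h1, h2]
        simp
      simp only [List.cons_append]
      rw [pairAdj, hbounds, pairAdj_map_shift]
      congr 1
      · simp
      · congr 1
        funext p
        simp only [Prod.mk.injEq]
        refine ⟨by ring, by ring⟩

-- ===== VERDICT (by name: the statement is the Claim_ definition above) =====
theorem segments_from_labels_spec : Claim_equal_segments_from_labels := by
  intro labels _
  unfold Spec_segments_from_labels segments_from_labels_alt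
  rw [A_eq_bsegs, bsegs_eq_segRec]
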